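-- pv_equiv track=rewrite | github.com/Charmandiox9/Material-Ayudantias-Programacion | 2026-01/Prueba 1/Ayudantía 5/Solve/EJ1.py | verificar_largo
-- ===== SOURCE A (Python) =====
-- def verificar_largo(password):
--     contador = 0
--     for caracter in password:
--         contador += 1
--     if contador >= 10:
--         return True
--     else:
--         return False
-- ===== SOURCE B (Python) =====
-- def verificar_largo(password):
--     return len(password) >= 10
-- ===== Notes on version B (the rewrite author's own statement) =====
-- stated objective: idiomatic
-- what changed: Replaced the manual element-by-element counting loop and if/else with a single closed-form len() comparison.
import Mathlib
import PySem

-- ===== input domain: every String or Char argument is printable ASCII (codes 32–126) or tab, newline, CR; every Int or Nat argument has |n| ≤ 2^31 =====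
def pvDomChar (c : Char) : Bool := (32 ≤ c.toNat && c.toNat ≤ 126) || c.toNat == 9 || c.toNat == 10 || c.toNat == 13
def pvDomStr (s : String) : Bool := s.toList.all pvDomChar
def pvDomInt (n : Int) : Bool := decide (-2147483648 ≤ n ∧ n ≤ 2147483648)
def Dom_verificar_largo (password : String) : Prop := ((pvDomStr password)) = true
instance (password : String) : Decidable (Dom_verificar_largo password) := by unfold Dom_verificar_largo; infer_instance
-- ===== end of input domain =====

-- ===== PORT A =====
-- B replaces A's manual counting loop with a closed-form length comparison (return value only).
def verificar_largo (password : String) : Bool :=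
  let contador := password.toList.foldl (fun contador _ => contador + 1) (0 : Int)
  if contador ≥ 10 then true else false

-- ===== PORT B =====
def verificar_largo_alt (password : String) : Bool :=
  decide (PySem.Str.len password ≥ 10)

-- ===== PRECONDITION & SPEC =====
def Spec_verificar_largo (password : String) (out : Bool) : Prop := out = verificar_largo_alt password
instance (password : String) (out : Bool) : Decidable (Spec_verificar_largo password out) := by unfold Spec_verificar_largo; infer_instance

-- ===== CLAIM (what is proved, stated in full; the proofs are below) =====
def Claim_equal_verificar_largo : Prop := ∀ (password : String), Dom_verificar_largo password → Spec_verificar_largo password (verificar_largo password)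

-- ===== LEMMAS AND PROOFS =====

-- ===== VERDICT (by name: the statement is the Claim_ definition above) =====
lemma count_foldl (l : List Char) (k : Int) :
    l.foldl (fun contador _ => contador + 1) k = k + l.length := by
  induction l generalizing k with
  | nil => simp
  | cons c t ih => simp [List.foldl, ih]; ring

theorem verificar_largo_spec : Claim_equal_verificar_largo := by
  intro password _
  unfold Spec_verificar_largo verificar_largo verificar_largo_alt
  simp [count_foldl, PySem.Str.len_eq]
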